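-- pv_equiv track=rewrite | github.com/macky337/golf_score | pages/06_result_confirmation.py | calc_putt_points
-- ===== SOURCE A (Python) =====
-- def calc_putt_points(putt_scores, n):
--     scores = list(putt_scores.values())
--     min_score = min(scores)
--     winners = [m_id for m_id, score in putt_scores.items() if score == min_score]
--     points = {m_id: 0 for m_id in putt_scores}
--     if n == 4:
--         if len(winners) == 1:
--             points[winners[0]] = 30
--             for m_id in putt_scores:
--                 if m_id not in winners:
--                     points[m_id] = -10
--         elif len(winners) == 2:
--             for m_id in putt_scores:
--                 points[m_id] = 10 if m_id in winners else -10
--         elif len(winners) == 3: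
--             for m_id in putt_scores:
--                 points[m_id] = 10 if m_id in winners else -30
--     elif n == 3:
--         if len(winners) == 1:
--             points[winners[0]] = 20
--             for m_id in putt_scores:
--                 if m_id not in winners:
--                     points[m_id] = -20
--         elif len(winners) == 2:
--             for m_id in putt_scores:
--                 points[m_id] = 10 if m_id in winners else -20
--     return points
-- ===== SOURCE B (Python) =====
-- def calc_putt_points(putt_scores, n):
--     low = min(putt_scores.values())
--     k = list(putt_scores.values()).count(low)
--     if n in (3, 4) and k < n:
--         # winners take 10*(n-1) solo, else 10 each; losers pay a flat -20 in
--         # 3-ball, or split the winners' take zero-sum (-win*k // (n-k)) in 4-ball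
--         win = 10 * (n - 1) if k == 1 else 10
--         lose = -20 if n == 3 else -(win * k) // (n - k)
--     else:
--         win = lose = 0
--     return {m: (win if s == low else lose) for m, s in putt_scores.items()}
-- ===== Notes on version B (the rewrite author's own statement) =====
-- stated objective: alternative
-- what changed: Replaced A's enumerated two-level branch tree (five hard-coded point-assignment loops with membership tests against a winners list) by an arithmetic derivation of the payout pair -- win = 10*(n-1) if solo else 10, losers pay a flat -20 in 3-ball or the zero-sum split -(win*k)//(n-k) in 4-ball -- computed from the tie count k (a count of the minimum, no winners list), followed by one uniform pass over the dict.
import Mathlib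
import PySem

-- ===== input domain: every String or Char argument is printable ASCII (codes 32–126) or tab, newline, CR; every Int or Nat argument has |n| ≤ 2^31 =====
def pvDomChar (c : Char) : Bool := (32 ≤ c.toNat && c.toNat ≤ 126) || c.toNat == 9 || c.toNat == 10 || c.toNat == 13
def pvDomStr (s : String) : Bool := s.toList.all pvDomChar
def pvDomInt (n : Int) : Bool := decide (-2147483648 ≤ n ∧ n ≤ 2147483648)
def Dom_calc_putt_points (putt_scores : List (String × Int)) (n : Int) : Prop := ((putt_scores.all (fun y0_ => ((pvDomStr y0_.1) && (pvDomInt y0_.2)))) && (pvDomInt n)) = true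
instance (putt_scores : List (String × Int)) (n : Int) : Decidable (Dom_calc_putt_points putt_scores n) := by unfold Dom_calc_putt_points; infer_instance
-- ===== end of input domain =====

-- B derives the payout pair arithmetically (solo winner takes 10*(n-1), otherwise 10 each;
-- losers pay a flat -20 in 3-ball or the zero-sum split -(win*k)//(n-k) in 4-ball) from the
-- tie count of the minimum, then does one uniform pass; A enumerates five assignment loops.

-- ===== PORT A =====
-- A-side helpers: the winners list and the zero-initialised points dict, named for readability
def winnersOf (putt_scores : List (String × Int)) (min_score : Int) : List String :=
  (putt_scores.filter (fun p => p.2 == min_score)).map Prod.fst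

def zeroDict (putt_scores : List (String × Int)) : PySem.Dict String Int :=
  putt_scores.foldl (fun d p => d.insert p.1 0) PySem.Dict.empty

def calc_putt_points (putt_scores : List (String × Int)) (n : Int) : List (String × Int) :=
  let scores := putt_scores.map Prod.snd
  match PySem.List.min? scores (fun x => x) with
  | none => []   -- min([]) raises ValueError; excluded by Pre_
  | some min_score =>
    let winners := winnersOf putt_scores min_score
    let points := zeroDict putt_scores
    let points :=
      if n = 4 then
        if winners.length = 1 then
          -- winners[0]: headI is exact here, guarded by length = 1
          let points := points.insert winners.headI 30
          putt_scores.foldl (fun pts p =>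
            if winners.contains p.1 then pts else pts.insert p.1 (-10)) points
        else if winners.length = 2 then
          putt_scores.foldl (fun pts p =>
            pts.insert p.1 (if winners.contains p.1 then 10 else -10)) points
        else if winners.length = 3 then
          putt_scores.foldl (fun pts p =>
            pts.insert p.1 (if winners.contains p.1 then 10 else -30)) points
        else points
      else if n = 3 then
        if winners.length = 1 then
          let points := points.insert winners.headI 20
          putt_scores.foldl (fun pts p =>
            if winners.contains p.1 then pts else pts.insert p.1 (-20)) points
        else if winners.length = 2 then
          putt_scores.foldl (fun pts p =>
            pts.insert p.1 (if winners.contains p.1 then 10 else -20)) points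
        else points
      else points
    points.items

-- ===== PORT B =====
def calc_putt_points_alt (putt_scores : List (String × Int)) (n : Int) : List (String × Int) :=
  match PySem.List.min? (putt_scores.map Prod.snd) (fun x => x) with
  | none => []   -- min raises on the empty dict; excluded by Pre_
  | some low =>
    let k : Int := (PySem.List.count (putt_scores.map Prod.snd) low : Int)
    let wl : Int × Int :=
      if (n = 3 ∨ n = 4) ∧ k < n then
        let win : Int := if k = 1 then 10 * (n - 1) else 10
        let lose : Int := if n = 3 then -20 else PySem.Int.floordiv (-(win * k)) (n - k)
        (win, lose)
      else (0, 0)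
    putt_scores.map (fun p => (p.1, if p.2 == low then wl.1 else wl.2))

-- ===== PRECONDITION & SPEC =====
-- putt_scores is a Python dict: it is nonempty (min([]) raises ValueError) and — inherent in the
-- dict type, not a narrowing — its keys are pairwise distinct.
def Pre_calc_putt_points (putt_scores : List (String × Int)) (n : Int) : Prop :=
  putt_scores ≠ [] ∧ (putt_scores.map Prod.fst).Nodup
instance (putt_scores : List (String × Int)) (n : Int) : Decidable (Pre_calc_putt_points putt_scores n) := by unfold Pre_calc_putt_points; infer_instance

def pvWitness_calc_putt_points : (List (String × Int)) × Int :=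
  ([("a", 2), ("b", 1), ("c", 1), ("d", 3)], 4)

def Spec_calc_putt_points (putt_scores : List (String × Int)) (n : Int) (out : List (String × Int)) : Prop := out = calc_putt_points_alt putt_scores n
instance (putt_scores : List (String × Int)) (n : Int) (out : List (String × Int)) : Decidable (Spec_calc_putt_points putt_scores n out) := by unfold Spec_calc_putt_points; infer_instance

-- ===== CLAIM (what is proved, stated in full; the proofs are below) =====
def Claim_equal_calc_putt_points : Prop := ∀ (putt_scores : List (String × Int)) (n : Int), Dom_calc_putt_points putt_scores n → Pre_calc_putt_points putt_scores n → Spec_calc_putt_points putt_scores n (calc_putt_points putt_scores n)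

-- ===== LEMMAS AND PROOFS =====

-- generic shape of A's assignment loops: per element, either skip or overwrite key p.1
def pvStepFold (step : String × Int → Option Int) (L : List (String × Int))
    (d : PySem.Dict String Int) : PySem.Dict String Int :=
  L.foldl (fun pts p => match step p with | none => pts | some v => pts.insert p.1 v) d

theorem pvWitness_ok : Pre_calc_putt_points pvWitness_calc_putt_points.1 pvWitness_calc_putt_points.2 := by
  decide

theorem keys_pvStepFold (step : String × Int → Option Int) :
    ∀ (L : List (String × Int)) (d : PySem.Dict String Int),
      (∀ q ∈ L, d.contains q.1 = true) → (pvStepFold step L d).keys = d.keys := by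
  intro L
  induction L with
  | nil => intro d _; rfl
  | cons p t ih =>
    intro d hc
    cases hstep : step p with
    | none =>
      simpa [pvStepFold, hstep] using ih d (fun q hq => hc q (List.mem_cons_of_mem _ hq))
    | some v =>
      have h1 : (pvStepFold step t (d.insert p.1 v)).keys = (d.insert p.1 v).keys := by
        apply ih
        intro q hq
        rw [PySem.Dict.contains_insert]
        simp [hc q (List.mem_cons_of_mem _ hq)]
      have h2 : (d.insert p.1 v).keys = d.keys :=
        PySem.Dict.keys_insert_of_contains _ _ (hc p (List.mem_cons_self ..))
      simpa [pvStepFold, hstep, h2] using h1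

theorem getD_pvStepFold_notmem (step : String × Int → Option Int) :
    ∀ (L : List (String × Int)) (d : PySem.Dict String Int) (k : String),
      (∀ q ∈ L, q.1 ≠ k) → (pvStepFold step L d).getD k 0 = d.getD k 0 := by
  intro L
  induction L with
  | nil => intro d k _; rfl
  | cons p t ih =>
    intro d k h
    cases hstep : step p with
    | none =>
      simpa [pvStepFold, hstep] using ih d k (fun q hq => h q (List.mem_cons_of_mem _ hq))
    | some v =>
      have h1 := ih (d.insert p.1 v) k (fun q hq => h q (List.mem_cons_of_mem _ hq))
      have h2 : (d.insert p.1 v).getD k 0 = d.getD k 0 :=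
        PySem.Dict.getD_insert_of_ne _ _ _ (fun hk => h p (List.mem_cons_self ..) hk.symm)
      simpa [pvStepFold, hstep, h2] using h1

theorem getD_pvStepFold (step : String × Int → Option Int) (L : List (String × Int))
    (hnd : (L.map Prod.fst).Nodup) (p : String × Int) (hp : p ∈ L) (d : PySem.Dict String Int) :
    (pvStepFold step L d).getD p.1 0
      = match step p with | some v => v | none => d.getD p.1 0 := by
  obtain ⟨l1, l2, rfl⟩ := List.append_of_mem hp
  have hnd' := hnd
  simp only [List.map_append, List.map_cons] at hnd'
  obtain ⟨nd1, nd2, disj⟩ := List.nodup_append.mp hnd'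
  have h1 : ∀ q ∈ l1, q.1 ≠ p.1 := by
    intro q hq hqe
    have hm1 : p.1 ∈ l1.map Prod.fst := by rw [← hqe]; exact List.mem_map_of_mem hq
    have hm2 : p.1 ∈ p.1 :: l2.map Prod.fst := List.mem_cons_self ..
    exact disj p.1 hm1 p.1 hm2 rfl
  have h2 : ∀ q ∈ l2, q.1 ≠ p.1 := by
    intro q hq hqe
    exact (List.nodup_cons.mp nd2).1 (by rw [← hqe]; exact List.mem_map_of_mem hq)
  have hsplit : pvStepFold step (l1 ++ p :: l2) d
      = pvStepFold step l2 ((fun pts q => match step q with | none => pts | some v => pts.insert q.1 v) (pvStepFold step l1 d) p) := by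
    simp [pvStepFold, List.foldl_append]
  rw [hsplit]
  cases hstep : step p with
  | none =>
    simp only [hstep]
    rw [getD_pvStepFold_notmem step l2 _ p.1 h2]
    exact getD_pvStepFold_notmem step l1 d p.1 h1
  | some v =>
    simp only [hstep]
    rw [getD_pvStepFold_notmem step l2 _ p.1 h2]
    exact PySem.Dict.getD_insert_self _ _ _ _

-- the zero-initialised dict {m_id: 0 for m_id in putt_scores}
theorem items_zero_dict (L : List (String × Int)) (hnd : (L.map Prod.fst).Nodup) :
    (L.foldl (fun d p => d.insert p.1 0) PySem.Dict.empty).items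
      = L.map (fun p => (p.1, (0 : Int))) := by
  have := PySem.Dict.items_foldl_insert_fresh (l := L) (k := Prod.fst)
      (v := fun _ => (0 : Int)) (d := PySem.Dict.empty)
      (by intro a _; exact PySem.Dict.contains_empty _) hnd
  simpa using this

theorem length_filter_map {α β : Type} (f : α → β) (p : β → Bool) (l : List α) :
    ((l.map f).filter p).length = (l.filter (fun a => p (f a))).length := by
  induction l with
  | nil => rfl
  | cons a t ih =>
    simp only [List.map_cons, List.filter_cons]
    cases p (f a) <;> simp [ih]

theorem calc_putt_points_spec : Claim_equal_calc_putt_points := by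
  intro L n _hdom hpre
  obtain ⟨hne, hnd⟩ := hpre
  unfold Spec_calc_putt_points
  cases hmin : PySem.List.min? (L.map Prod.snd) (fun x => x) with
  | none => simp [calc_putt_points, calc_putt_points_alt, hmin]
  | some m =>
    simp only [calc_putt_points, calc_putt_points_alt, hmin]
    -- shared facts about the winners list and the zero dict
    have hd0items : (zeroDict L).items = L.map (fun p => (p.1, (0 : Int))) :=
      items_zero_dict L hnd
    have hd0keys : (zeroDict L).keys = L.map Prod.fst := by
      show (zeroDict L).items.map Prod.fst = _
      rw [hd0items, List.map_map]
      rfl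
    have hd0cont : ∀ q ∈ L, (zeroDict L).contains q.1 = true := by
      intro q hq
      rw [PySem.Dict.contains_iff_mem_keys, hd0keys]
      exact List.mem_map_of_mem hq
    have hWmem : ∀ p ∈ L, (p.1 ∈ winnersOf L m ↔ p.2 = m) := by
      intro p hp
      constructor
      · intro h
        obtain ⟨q, hq, hqe⟩ := List.mem_map.mp h
        obtain ⟨hqL, hq2⟩ := List.mem_filter.mp hq
        have hqp : q = p := List.inj_on_of_nodup_map hnd hqL hp hqe
        have hq2' : q.2 = m := by simpa using hq2
        rw [← hqp]
        exact hq2'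
      · intro h
        exact List.mem_map_of_mem (List.mem_filter.mpr ⟨hp, by simp [h]⟩)
    -- B's tie count k equals the length of A's winners list
    have hk : PySem.List.count (L.map Prod.snd) m = (winnersOf L m).length := by
      rw [PySem.List.count_eq, List.count_eq_countP, List.countP_eq_length_filter]
      simp only [winnersOf, List.length_map]
      exact length_filter_map Prod.snd (fun s => s == m) L
    -- the minimum occurs in the list, so the winners list is nonempty
    have hkpos : 1 ≤ (winnersOf L m).length := by
      have hmem : m ∈ L.map Prod.snd := PySem.List.min?_mem hmin
      rw [← hk, PySem.List.count_eq]
      exact List.count_pos_iff.mpr hmem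
    have hmain : ∀ (step : String × Int → Option Int) (d : PySem.Dict String Int),
        d.keys = L.map Prod.fst → (∀ q ∈ L, d.contains q.1 = true) →
        (pvStepFold step L d).items
          = L.map (fun p => (p.1, match step p with | some v => v | none => d.getD p.1 0)) := by
      intro step d hkeys hcont
      have hkn : (pvStepFold step L d).keys.Nodup := by
        rw [keys_pvStepFold step L d hcont, hkeys]; exact hnd
      rw [PySem.Dict.items_eq_map_keys _ hkn 0, keys_pvStepFold step L d hcont, hkeys,
        List.map_map]
      refine List.map_congr_left ?_
      intro p hp
      show (p.1, (pvStepFold step L d).getD p.1 0) = _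
      rw [getD_pvStepFold step L hnd p hp d]
    -- the uniform assignment loops (two-winner / three-winner branches)
    have branchU : ∀ a b : Int,
        (L.foldl (fun pts p => pts.insert p.1 (if (winnersOf L m).contains p.1 then a else b))
          (zeroDict L)).items
        = L.map (fun p => (p.1, if p.2 == m then a else b)) := by
      intro a b
      have h := hmain (fun p => some (if (winnersOf L m).contains p.1 then a else b))
        (zeroDict L) hd0keys hd0cont
      rw [show (L.foldl (fun pts p => pts.insert p.1 (if (winnersOf L m).contains p.1 then a else b)) (zeroDict L))
          = pvStepFold (fun p => some (if (winnersOf L m).contains p.1 then a else b)) L (zeroDict L) from rfl, h]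
      refine List.map_congr_left ?_
      intro p hp
      by_cases hb : p.2 = m
      · have hcm : p.1 ∈ winnersOf L m := (hWmem p hp).mpr hb
        simp [hcm, hb]
      · have hcm : p.1 ∉ winnersOf L m := fun h' => hb ((hWmem p hp).mp h')
        simp [hcm, hb]
    -- the single-winner branch: one insert, then a skip-the-winner loop
    have branch1 : ∀ a b : Int, (winnersOf L m).length = 1 →
        (L.foldl (fun pts p => if (winnersOf L m).contains p.1 then pts else pts.insert p.1 b)
          ((zeroDict L).insert (winnersOf L m).headI a)).items
        = L.map (fun p => (p.1, if p.2 == m then a else b)) := by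
      intro a b hlen1
      obtain ⟨w, hw⟩ := List.length_eq_one_iff.mp hlen1
      have hwW : w ∈ winnersOf L m := by rw [hw]; exact List.mem_cons_self ..
      have hwmemL : w ∈ L.map Prod.fst := by
        obtain ⟨q, hq, hqe⟩ := List.mem_map.mp hwW
        exact hqe ▸ List.mem_map_of_mem (List.mem_filter.mp hq).1
      have hhead : (winnersOf L m).headI = w := by rw [hw]; rfl
      have hcw : (zeroDict L).contains w = true := by
        rw [PySem.Dict.contains_iff_mem_keys, hd0keys]; exact hwmemL
      have hdk : ((zeroDict L).insert w a).keys = L.map Prod.fst := by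
        rw [PySem.Dict.keys_insert_of_contains _ a hcw, hd0keys]
      have hdc : ∀ q ∈ L, ((zeroDict L).insert w a).contains q.1 = true := by
        intro q hq
        rw [PySem.Dict.contains_insert]
        simp [hd0cont q hq]
      rw [hhead]
      have hfun : (fun (pts : PySem.Dict String Int) (p : String × Int) =>
            if (winnersOf L m).contains p.1 then pts else pts.insert p.1 b)
          = (fun pts p => match (fun p : String × Int =>
              if (winnersOf L m).contains p.1 then none else some b) p with
              | none => pts | some v => pts.insert p.1 v) := by
        funext pts p
        by_cases hc : p.1 ∈ winnersOf L m <;> simp [hc]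
      rw [hfun]
      have h := hmain (fun p => if (winnersOf L m).contains p.1 then none else some b)
        ((zeroDict L).insert w a) hdk hdc
      rw [show (L.foldl (fun pts p => match (fun p : String × Int =>
            if (winnersOf L m).contains p.1 then none else some b) p with
            | none => pts | some v => pts.insert p.1 v) ((zeroDict L).insert w a))
          = pvStepFold (fun p => if (winnersOf L m).contains p.1 then none else some b) L
              ((zeroDict L).insert w a) from rfl, h]
      refine List.map_congr_left ?_
      intro p hp
      by_cases hb : p.2 = m
      · have hcm : p.1 ∈ winnersOf L m := (hWmem p hp).mpr hb
        have hpw : p.1 = w := by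
          have hmem := hcm
          rw [hw] at hmem
          simpa using hmem
        simp [hb, hpw, hwW, PySem.Dict.getD_insert_self]
      · have hcm : p.1 ∉ winnersOf L m := fun h' => hb ((hWmem p hp).mp h')
        simp [hcm, hb]
    -- abbreviate the winners count
    set W : Nat := (winnersOf L m).length with hW
    have hkcast : ((PySem.List.count (L.map Prod.snd) m : Nat) : Int) = (W : Int) := by
      exact_mod_cast hk
    rw [hkcast]
    -- case analysis on n and the number of winners
    by_cases hn4 : n = 4
    · subst hn4
      rw [if_pos rfl]
      by_cases h1 : W = 1
      · rw [if_pos h1, branch1 30 (-10) h1, h1]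
        norm_num [PySem.Int.floordiv, show ((-30:Int)).fdiv 3 = -10 from by decide]
      · rw [if_neg h1]
        by_cases h2 : W = 2
        · rw [if_pos h2, branchU 10 (-10), h2]
          norm_num [PySem.Int.floordiv, show ((-20:Int)).fdiv 2 = -10 from by decide]
        · rw [if_neg h2]
          by_cases h3 : W = 3
          · rw [if_pos h3, branchU 10 (-30), h3]
            norm_num [PySem.Int.floordiv, show ((-30:Int)).fdiv 1 = -30 from by decide]
          · -- at least four tied: both sides are all zeros
            rw [if_neg h3, hd0items]
            have hge : (4 : Int) ≤ (W : Int) := by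
              have : 4 ≤ W := by omega
              exact_mod_cast this
            rw [if_neg (by push_neg; intro _; omega)]
            simp
    · rw [if_neg hn4]
      by_cases hn3 : n = 3
      · subst hn3
        rw [if_pos rfl]
        by_cases h1 : W = 1
        · rw [if_pos h1, branch1 20 (-20) h1, h1]
          norm_num
        · rw [if_neg h1]
          by_cases h2 : W = 2
          · rw [if_pos h2, branchU 10 (-20), h2]
            norm_num
          · -- all three tied (or more entries than players): zeros on both sides
            rw [if_neg h2, hd0items]
            rw [if_neg (by push_neg; intro _; omega)]
            simp
      · -- n is neither 3 nor 4: zeros on both sides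
        rw [if_neg hn3, hd0items]
        rw [if_neg (by push_neg; rintro (h | h) <;> simp_all)]
        simp
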